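-- pv_equiv track=rewrite | github.com/yzye/attention-model | RNNATT.py | reviews_encode
-- ===== SOURCE A (Python) =====
-- import itertools
-- from collections import Counter
--
-- def reviews_encode(reviews):
--
--     words = list(itertools.chain.from_iterable(reviews))
--     counts = Counter(words)
--     vocab = sorted(counts, key=counts.get, reverse=True)
--     vocab_to_int = {word: ii for ii, word in enumerate(vocab, 1)}
--
--     reviews_ints = []
--     for each in reviews:
--         reviews_ints.append([vocab_to_int[word] for word in each])
--
--     return reviews_ints, vocab_to_int
-- ===== SOURCE B (Python) =====
-- from collections import Counter
--
--
-- def reviews_encode(reviews):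
--     counts = Counter()
--     for each in reviews:
--         for w in each:
--             counts[w] += 1
--
--     # bucket sort by frequency instead of a comparison sort:
--     # buckets filled in Counter insertion order, swept from the highest
--     # count down to 1, reproduces sorted(..., reverse=True)'s stable order
--     buckets = {}
--     for w, c in counts.items():
--         buckets.setdefault(c, []).append(w)
--
--     vocab = []
--     if counts:
--         for c in range(max(counts.values()), 0, -1):
--             vocab += buckets.get(c, [])
--
--     vocab_to_int = {}
--     for i, w in enumerate(vocab, 1):
--         vocab_to_int[w] = i
--
--     return [[vocab_to_int[w] for w in each] for each in reviews], vocab_to_int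
-- ===== Notes on version B (the rewrite author's own statement) =====
-- stated objective: alternative
-- what changed: Replaces the comparison-based stable sort of the vocabulary by a counting/bucket sort over integer frequencies (buckets filled in Counter insertion order, swept from max count down to 1), with the Counter built by an explicit nested loop and the encoding done by comprehensions.
import Mathlib
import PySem

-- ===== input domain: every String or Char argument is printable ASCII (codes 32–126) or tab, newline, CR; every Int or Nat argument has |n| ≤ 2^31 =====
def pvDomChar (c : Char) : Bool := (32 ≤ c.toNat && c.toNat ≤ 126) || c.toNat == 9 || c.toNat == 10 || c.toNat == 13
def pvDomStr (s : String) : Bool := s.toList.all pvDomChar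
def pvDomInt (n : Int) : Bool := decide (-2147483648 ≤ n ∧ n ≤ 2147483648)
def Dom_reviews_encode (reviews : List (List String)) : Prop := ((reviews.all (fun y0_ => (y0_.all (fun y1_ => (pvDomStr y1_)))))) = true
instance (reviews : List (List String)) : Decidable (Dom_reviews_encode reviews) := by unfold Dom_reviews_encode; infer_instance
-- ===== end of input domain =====

-- B replaces the comparison sort of the vocabulary by a counting/bucket sort over the
-- integer frequencies (same result, a genuinely different algorithm; no speed claimed).

-- ===== PORT A =====
-- counts.get(word) is some count for every word sorted iterates (all are keys of counts),
-- and vocab_to_int[word] always hits a key (every word occurs in vocab): both are ported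
-- with getD _ 0, exact on those inputs.
def reviews_encode (reviews : List (List String)) : List (List Int) × (List (String × Int)) :=
  let words := reviews.flatten
  let counts := PySem.Dict.counter words
  let vocab := PySem.List.sorted counts.keys (fun w => counts.getD w 0) true
  let vocab_to_int := (PySem.List.enumerate vocab 1).foldl
    (fun d p => d.insert p.2 p.1) (PySem.Dict.empty : PySem.Dict String Int)
  let reviews_ints := reviews.foldl
    (fun acc each => acc ++ [each.map (fun w => vocab_to_int.getD w 0)]) []
  (reviews_ints, vocab_to_int.items)

-- ===== PORT B =====
-- vocab_to_int[w] always hits a key, ported with getD _ 0 (exact there); the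
-- 'if counts' truthiness guard is items = []; max(counts.values()) is max? (some on
-- the guarded nonempty branch).
def reviews_encode_alt (reviews : List (List String)) : List (List Int) × (List (String × Int)) :=
  let counts := reviews.foldl
    (fun d each => each.foldl (fun d w => d.modify w 0 (· + 1)) d)
    (PySem.Dict.empty : PySem.Dict String Int)
  let buckets := counts.items.foldl
    (fun b p => b.modify p.2 [] (· ++ [p.1]))
    (PySem.Dict.empty : PySem.Dict Int (List String))
  let vocab :=
    if counts.items = [] then []
    else
      match PySem.List.max? counts.values (fun x => x) with
      | some m => (PySem.List.pyRange m 0 (-1)).foldl (fun acc c => acc ++ buckets.getD c []) []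
      | none => []
  let vocab_to_int := (PySem.List.enumerate vocab 1).foldl
    (fun d p => d.insert p.2 p.1) (PySem.Dict.empty : PySem.Dict String Int)
  (reviews.map (fun each => each.map (fun w => vocab_to_int.getD w 0)), vocab_to_int.items)

-- ===== PRECONDITION & SPEC =====
def Spec_reviews_encode (reviews : List (List String)) (out : List (List Int) × (List (String × Int))) : Prop := out = reviews_encode_alt reviews
instance (reviews : List (List String)) (out : List (List Int) × (List (String × Int))) : Decidable (Spec_reviews_encode reviews out) := by unfold Spec_reviews_encode; infer_instance

-- ===== CLAIM (what is proved, stated in full; the proofs are below) =====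
def Claim_equal_reviews_encode : Prop := ∀ (reviews : List (List String)), Dom_reviews_encode reviews → Spec_reviews_encode reviews (reviews_encode reviews)

-- ===== LEMMAS AND PROOFS =====

-- insertBy puts x in front when it goes before everything (also the empty list)
theorem pv_insertBy_eq_cons {α : Type} (before : α → α → Bool) (x : α) (zs : List α)
    (h : ∀ y ∈ zs, before x y = true) :
    PySem.List.insertBy before x zs = x :: zs := by
  cases zs with
  | nil => rfl
  | cons z zs => simp [PySem.List.insertBy, h z (by simp)]

-- insertBy skips a prefix it does not go before
theorem pv_insertBy_append {α : Type} (before : α → α → Bool) (x : α) (as bs : List α)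
    (h : ∀ y ∈ as, before x y = false) :
    PySem.List.insertBy before x (as ++ bs) = as ++ PySem.List.insertBy before x bs := by
  induction as with
  | nil => rfl
  | cons a as ih =>
    simp only [List.cons_append, PySem.List.insertBy, h a (by simp)]
    simp only [ih (fun y hy => h y (by simp [hy])), Bool.false_eq_true, if_false]

theorem pv_flatMap_congr {α β : Type} {cs : List α} {f g : α → List β}
    (h : ∀ c ∈ cs, f c = g c) : cs.flatMap f = cs.flatMap g := by
  induction cs with
  | nil => rfl
  | cons c cs ih => simp [List.flatMap_cons, h c (by simp), ih (fun c hc => h c (by simp [hc]))]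

-- inserting x into a bucketed list appends it to its own (key x) bucket
theorem pv_insertBy_buckets {α : Type} (key : α → Int) (x : α) (cs : List Int) (g : Int → List α)
    (hg : ∀ c ∈ cs, ∀ y ∈ g c, key y = c)
    (hcs : cs.Pairwise (· > ·)) (hx : key x ∈ cs) :
    PySem.List.insertBy (fun a b => decide (key b < key a)) x (cs.flatMap g)
      = cs.flatMap (fun c => g c ++ if key x = c then [x] else []) := by
  induction cs with
  | nil => simp at hx
  | cons c cs ih =>
    rw [List.pairwise_cons] at hcs
    by_cases hxc : key x = c
    · -- x joins bucket c; everything after has strictly smaller key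
      have hskip : ∀ y ∈ g c, (fun a b => decide (key b < key a)) x y = false := by
        intro y hy
        have := hg c (by simp) y hy
        simp [this, hxc]
      rw [List.flatMap_cons, pv_insertBy_append _ _ _ _ hskip,
        pv_insertBy_eq_cons _ _ _ (by
          intro y hy
          simp only [List.mem_flatMap] at hy
          obtain ⟨c', hc', hyc'⟩ := hy
          have h1 := hg c' (by simp [hc']) y hyc'
          have h2 := hcs.1 c' hc'
          simp [h1, hxc]; omega)]
      rw [List.flatMap_cons]
      have : cs.flatMap (fun c' => g c' ++ if key x = c' then [x] else [])
          = cs.flatMap g := by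
        apply pv_flatMap_congr
        intro c' hc'
        have h2 := hcs.1 c' hc'
        have : key x ≠ c' := by omega
        simp [this]
      rw [this, if_pos hxc]
      simp
    · -- x's bucket is further down
      have hx' : key x ∈ cs := by
        rcases List.mem_cons.mp hx with h | h
        · exact absurd h hxc
        · exact h
      have hskip : ∀ y ∈ g c, (fun a b => decide (key b < key a)) x y = false := by
        intro y hy
        have h1 := hg c (by simp) y hy
        have h2 := hcs.1 _ hx'
        simp [h1]; omega
      rw [List.flatMap_cons, pv_insertBy_append _ _ _ _ hskip,
        ih (fun c' hc' => hg c' (by simp [hc'])) hcs.2 hx']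
      rw [List.flatMap_cons, if_neg hxc]
      simp

-- Python's stable reverse sort IS the bucket decomposition along any strictly
-- descending list of values covering all keys
theorem pv_sorted_rev_eq_flatMap {α : Type} (key : α → Int) (cs : List Int) (l : List α)
    (hcs : cs.Pairwise (· > ·)) (hl : ∀ x ∈ l, key x ∈ cs) :
    PySem.List.sorted l key true = cs.flatMap (fun c => l.filter (fun x => key x == c)) := by
  induction l using List.reverseRecOn with
  | nil => simp [PySem.List.sorted]
  | append_singleton l x ih =>
    rw [PySem.List.sorted_rev_eq_foldl_insertBy, List.foldl_append, List.foldl_cons,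
      List.foldl_nil, ← PySem.List.sorted_rev_eq_foldl_insertBy,
      ih (fun y hy => hl y (by simp [hy])),
      pv_insertBy_buckets key x cs _
        (by intro c hc y hy; simpa using (List.mem_filter.mp hy).2)
        hcs (hl x (by simp))]
    apply pv_flatMap_congr
    intro c hc
    by_cases h : key x = c <;> simp [List.filter_append, h]

-- the countdown range is strictly descending
theorem pv_pyRange_desc (m : Int) : (PySem.List.pyRange m 0 (-1)).Pairwise (· > ·) := by
  rw [PySem.List.pyRange_neg_one_eq_reverse]
  rw [List.pairwise_reverse]
  have := PySem.List.pairwise_lt_pyRange_one (0+1) (m+1)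
  exact this.imp (fun h => h)

-- B's nested counting loop builds Counter(flatten(reviews))
theorem pv_counts_eq (reviews : List (List String)) :
    reviews.foldl (fun d each => each.foldl (fun d w => d.modify w 0 (· + 1)) d)
      (PySem.Dict.empty : PySem.Dict String Int)
      = PySem.Dict.counter reviews.flatten := by
  rw [PySem.Dict.counter_eq_foldl, List.foldl_flatten]

-- grouping loop keyed by the pair's SECOND component: getD is the filtered firsts
theorem pv_getD_foldl_modify_swap (l : List (String × Int)) (d : PySem.Dict Int (List String)) (c : Int) :
    (l.foldl (fun b p => b.modify p.2 [] (· ++ [p.1])) d).getD c []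
      = d.getD c [] ++ (l.filter (fun p => p.2 == c)).map (·.1) := by
  induction l generalizing d with
  | nil => simp
  | cons p l ih =>
    rw [List.foldl_cons, ih]
    by_cases h : c = p.2
    · simp [h]
    · have h2 : (p.2 == c) = false := by simp; omega
      simp [PySem.Dict.getD_modify, h, h2]

-- B's bucket lookup is a filter over the counter's keys
theorem pv_bucket_getD (words : List String) (c : Int) :
    ((PySem.Dict.counter words).items.foldl (fun b p => b.modify p.2 [] (· ++ [p.1]))
        (PySem.Dict.empty : PySem.Dict Int (List String))).getD c []
      = (PySem.Dict.counter words).keys.filter (fun k => ((words.count k : Int) == c)) := by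
  rw [pv_getD_foldl_modify_swap]
  simp [PySem.Dict.items_counter, PySem.Dict.keys_counter, List.filter_map,
    Function.comp_def]

-- the vocabulary built by the descending bucket sweep IS A's stable reverse sort
theorem pv_vocab_eq (words : List String) :
    PySem.List.sorted (PySem.Dict.counter words).keys
        (fun w => (PySem.Dict.counter words).getD w 0) true
      = (if (PySem.Dict.counter words).items = [] then []
         else
           match PySem.List.max? (PySem.Dict.counter words).values (fun x => x) with
           | some m => (PySem.List.pyRange m 0 (-1)).foldl (fun acc c =>
               acc ++ ((PySem.Dict.counter words).items.foldl
                 (fun b p => b.modify p.2 [] (· ++ [p.1]))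
                 (PySem.Dict.empty : PySem.Dict Int (List String))).getD c []) []
           | none => []) := by
  cases hw : words with
  | nil => rfl
  | cons w ws =>
    have hitems : (PySem.Dict.counter words).items ≠ [] := by
      rw [hw, PySem.Dict.items_counter, PySem.Set.ofList_cons]
      simp
    rw [← hw] at *
    rw [if_neg hitems]
    have hvals : (PySem.Dict.counter words).values ≠ [] := by
      intro h
      apply hitems
      unfold PySem.Dict.values at h
      exact List.map_eq_nil_iff.mp h
    obtain ⟨m, hm⟩ : ∃ m, PySem.List.max? (PySem.Dict.counter words).values (fun x => x) = some m := by
      cases h : PySem.List.max? (PySem.Dict.counter words).values (fun x => x) with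
      | none => exact absurd ((PySem.List.max?_eq_none_iff _ _).mp h) hvals
      | some m => exact ⟨m, rfl⟩
    have hmax := PySem.List.max?_isMax hm
    simp only [hm]
    rw [PySem.List.foldl_append_eq_flatMap, List.nil_append]
    rw [pv_sorted_rev_eq_flatMap _ (PySem.List.pyRange m 0 (-1)) _ (pv_pyRange_desc m)]
    · apply pv_flatMap_congr
      intro c hc
      rw [pv_bucket_getD]
      apply List.filter_congr
      intro k hk
      simp [PySem.Dict.getD_counter]
    · intro x hx
      rw [PySem.List.mem_pyRange_neg_one]
      rw [PySem.Dict.keys_counter] at hx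
      have hxw : x ∈ words := (PySem.Set.mem_ofList _ _).mp hx
      constructor
      · rw [PySem.Dict.getD_counter]
        exact_mod_cast List.count_pos_iff.mpr hxw
      · have hxv : ((words.count x : Int)) ∈ (PySem.Dict.counter words).values := by
          unfold PySem.Dict.values
          rw [PySem.Dict.items_counter]
          rw [List.map_map]
          exact List.mem_map.mpr ⟨x, hx, rfl⟩
        have := hmax _ hxv
        rw [PySem.Dict.getD_counter]
        exact this

-- ===== VERDICT (by name: the statement is the Claim_ definition above) =====
theorem reviews_encode_spec : Claim_equal_reviews_encode := by
  intro reviews _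
  unfold Spec_reviews_encode reviews_encode reviews_encode_alt
  simp only [pv_counts_eq, ← pv_vocab_eq, PySem.List.foldl_append_singleton_eq_map,
    List.nil_append]
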